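-- pv_equiv track=rewrite | github.com/arjunsatarkar/tagrss | serve.py | parse_space_separated_tags
-- ===== SOURCE A (Python) =====
-- def parse_space_separated_tags(inp: str) -> list[str]:
--     tags: set[str] = set()
--     tag = ""
--     escaped = False
--     for c in inp:
--         match c:
--             case "\\":
--                 if not escaped:
--                     escaped = True
--                     continue
--             case " ":
--                 if not escaped:
--                     tags.add(tag)
--                     tag = ""
--                     continue
--         escaped = False
--         tag += c
--     if tag:
--         tags.add(tag)
--     return list(sorted(tags))
-- ===== SOURCE B (Python) =====
-- def _unescape(chunk: str) -> str:
--     # Resolve backslash escapes by splitting on '\'; each separator escapes the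
--     # character that follows it (an empty part means the escaped char is the next
--     # '\' itself); a trailing lone backslash yields an empty final part and is dropped.
--     parts = chunk.split("\\")
--     out = parts[0]
--     i = 1
--     while i < len(parts):
--         if parts[i] == "" and i + 1 < len(parts):
--             out += "\\" + parts[i + 1]
--             i += 2
--         else:
--             out += parts[i]
--             i += 1
--     return out
--
--
-- def parse_space_separated_tags(inp: str) -> list[str]:
--     # Stage 1: split on every space; stage 2: re-join tokens whose predecessor
--     # ends in an odd run of backslashes (that backslash escaped the space);
--     # stage 3: unescape each chunk, collecting into a set; the final chunk is
--     # kept only if non-empty.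
--     tokens = inp.split(" ")
--     chunks: list[str] = []
--     cur = tokens[0]
--     for tok in tokens[1:]:
--         if (len(cur) - len(cur.rstrip("\\"))) % 2 == 1:
--             cur = cur + " " + tok
--         else:
--             chunks.append(cur)
--             cur = tok
--     tags = set()
--     for c in chunks:
--         tags.add(_unescape(c))
--     last = _unescape(cur)
--     if last:
--         tags.add(last)
--     return sorted(tags)
-- ===== Notes on version B (the rewrite author's own statement) =====
-- stated objective: faster
-- what changed: Replaced the single-pass escaped-flag state machine with a staged pipeline: split on every space, merge adjacent tokens whose predecessor ends in an odd run of backslashes (an escaped space), then unescape each chunk by splitting it on backslashes and re-joining pairwise, finally sorting the set.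
import Mathlib
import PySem

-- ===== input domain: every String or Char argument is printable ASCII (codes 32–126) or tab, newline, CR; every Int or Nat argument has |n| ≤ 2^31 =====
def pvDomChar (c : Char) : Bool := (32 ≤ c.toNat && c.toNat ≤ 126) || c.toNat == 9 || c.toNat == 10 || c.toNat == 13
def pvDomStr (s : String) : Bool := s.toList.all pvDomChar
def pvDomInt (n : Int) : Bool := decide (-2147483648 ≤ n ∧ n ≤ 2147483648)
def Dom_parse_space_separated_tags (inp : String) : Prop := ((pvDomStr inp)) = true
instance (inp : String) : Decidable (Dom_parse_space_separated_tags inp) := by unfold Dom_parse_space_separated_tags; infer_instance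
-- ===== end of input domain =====

-- B replaces A's single-pass escaped-flag state machine by a staged pipeline:
-- split on spaces, merge tokens across escaped spaces, unescape each chunk via a
-- backslash-split (objective: faster — bulk str.split/join instead of a per-character
-- Python loop; measured faster in a timing run).

-- ===== PORT A =====
-- state: (tags, tag, escaped); one step of A's for-loop body
def pvAStep (s : PySem.Set String × List Char × Bool) (c : Char) :
    PySem.Set String × List Char × Bool :=
  if c = '\\' then
    if s.2.2 = false then (s.1, s.2.1, true)
    else (s.1, s.2.1 ++ [c], false)
  else if c = ' ' then
    if s.2.2 = false then (PySem.Set.add s.1 (String.ofList s.2.1), [], false)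
    else (s.1, s.2.1 ++ [c], false)
  else (s.1, s.2.1 ++ [c], false)

def parse_space_separated_tags (inp : String) : List String :=
  let st := inp.toList.foldl pvAStep (PySem.Set.empty, [], false)
  let tags := if st.2.1 ≠ [] then PySem.Set.add st.1 (String.ofList st.2.1) else st.1
  PySem.List.sorted tags (fun x => x) false

-- ===== PORT B =====
-- port of Source B's `len(cur) - len(cur.rstrip("\\"))` (rstrip with an argument has no
-- PySem primitive; ported by hand, exact: length minus length with trailing backslashes dropped)
def pvTrailBS (cur : List Char) : Nat :=
  cur.length - ((cur.reverse.dropWhile (· = '\\')).reverse).length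

-- Source B's merge loop over tokens[1:] with accumulator (chunks, cur)
def pvMergeGo : List (List Char) → List Char → List (List Char) → List (List Char) × List Char
  | acc, cur, [] => (acc, cur)
  | acc, cur, t :: rest =>
    if pvTrailBS cur % 2 = 1 then pvMergeGo acc (cur ++ ' ' :: t) rest
    else pvMergeGo (acc ++ [cur]) t rest

-- Source B's _unescape while-loop over parts[1:]
def pvUnescGo : List (List Char) → List Char
  | [] => []
  | [p] => p
  | p :: q :: rest => if p = [] then ('\\' :: q) ++ pvUnescGo rest else p ++ pvUnescGo (q :: rest)

-- Source B's _unescape: split on '\' then re-join pairwise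
def pvUnescape (s : List Char) : List Char :=
  match PySem.Chars.splitOn s ['\\'] with
  | [] => []   -- unreachable: split never returns an empty list
  | p :: ps => p ++ pvUnescGo ps

def parse_space_separated_tags_alt (inp : String) : List String :=
  let tokens := PySem.Chars.splitOn inp.toList [' ']
  let mg := match tokens with
    | [] => ([], [])   -- unreachable: split never returns an empty list
    | t0 :: ts => pvMergeGo [] t0 ts
  let tags := mg.1.foldl (fun s c => PySem.Set.add s (String.ofList (pvUnescape c))) PySem.Set.empty
  let last := pvUnescape mg.2
  let tags2 := if last ≠ [] then PySem.Set.add tags (String.ofList last) else tags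
  PySem.List.sorted tags2 (fun x => x) false

-- ===== PRECONDITION & SPEC =====
def Spec_parse_space_separated_tags (inp : String) (out : List String) : Prop := out = parse_space_separated_tags_alt inp
instance (inp : String) (out : List String) : Decidable (Spec_parse_space_separated_tags inp out) := by unfold Spec_parse_space_separated_tags; infer_instance

-- ===== CLAIM (what is proved, stated in full; the proofs are below) =====
def Claim_equal_parse_space_separated_tags : Prop := ∀ (inp : String), Dom_parse_space_separated_tags inp → Spec_parse_space_separated_tags inp (parse_space_separated_tags inp)

-- ===== LEMMAS AND PROOFS =====

-- reference: direct lookahead recursion, the common spec both ports are reduced to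
def pvSpecLoop (tags : PySem.Set String) (tag : List Char) : List Char → PySem.Set String
  | [] => if tag ≠ [] then PySem.Set.add tags (String.ofList tag) else tags
  | c :: rest =>
    if c = '\\' then
      match rest with
      | [] => if tag ≠ [] then PySem.Set.add tags (String.ofList tag) else tags
      | c2 :: rest2 => pvSpecLoop tags (tag ++ [c2]) rest2
    else if c = ' ' then pvSpecLoop (PySem.Set.add tags (String.ofList tag)) [] rest
    else pvSpecLoop tags (tag ++ [c]) rest

-- reference unescape (lookahead form)
def pvSpecU : List Char → List Char
  | [] => []
  | c :: rest =>
    if c = '\\' then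
      match rest with
      | [] => []
      | c2 :: rest2 => c2 :: pvSpecU rest2
    else c :: pvSpecU rest

-- reference raw chunks of the input: (first chunk, later chunks), split at unescaped spaces
def pvChunks : List Char → List Char × List (List Char)
  | [] => ([], [])
  | c :: r =>
    if c = '\\' then
      match r with
      | [] => (['\\'], [])
      | c2 :: r2 => let p := pvChunks r2; ('\\' :: c2 :: p.1, p.2)
    else if c = ' ' then let p := pvChunks r; ([], p.1 :: p.2)
    else let p := pvChunks r; (c :: p.1, p.2)

-- flushing the raw chunks (first chunk h with pending unescaped prefix tag, later chunks t)
def pvFinRunT (tags : PySem.Set String) (tag : List Char) : List Char → List (List Char) → PySem.Set String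
  | h, [] => if tag ++ pvSpecU h ≠ [] then PySem.Set.add tags (String.ofList (tag ++ pvSpecU h)) else tags
  | h, h2 :: t => pvFinRunT (PySem.Set.add tags (String.ofList (tag ++ pvSpecU h))) [] h2 t

-- single-character split, (head, tail) form
def pvSplit1 (ch : Char) : List Char → List Char × List (List Char)
  | [] => ([], [])
  | c :: r => let p := pvSplit1 ch r; if c = ch then ([], p.1 :: p.2) else (c :: p.1, p.2)

-- character-level view of Source B's token merge loop
def pvCM : List Char → List Char → List (List Char) × List Char
  | cur, [] => ([], cur)
  | cur, c :: r =>
    if c = ' ' then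
      if pvTrailBS cur % 2 = 1 then pvCM (cur ++ [' ']) r
      else let p := pvCM [] r; (cur :: p.1, p.2)
    else pvCM (cur ++ [c]) r

-- step / unfolding lemmas for the match-defined helpers
lemma pvSpecU_cons_ne (c : Char) (r : List Char) (hc : ¬ c = '\\') :
    pvSpecU (c :: r) = c :: pvSpecU r := by
  rw [pvSpecU.eq_def]; simp [hc]
lemma pvSpecU_bs_cons (c : Char) (r : List Char) : pvSpecU ('\\' :: c :: r) = c :: pvSpecU r := by
  rw [pvSpecU.eq_def]; simp

lemma pvSplit1_nil (ch : Char) : pvSplit1 ch [] = ([], []) := by simp [pvSplit1]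
lemma pvSplit1_eqc (ch : Char) (r : List Char) :
    pvSplit1 ch (ch :: r) = ([], (pvSplit1 ch r).1 :: (pvSplit1 ch r).2) := by
  rw [pvSplit1.eq_def]; simp
lemma pvSplit1_ne (ch c : Char) (r : List Char) (hc : ¬ c = ch) :
    pvSplit1 ch (c :: r) = (c :: (pvSplit1 ch r).1, (pvSplit1 ch r).2) := by
  rw [pvSplit1.eq_def]; simp [hc]

lemma pvCM_nil (cur : List Char) : pvCM cur [] = ([], cur) := by simp [pvCM]
lemma pvCM_space_odd (cur r : List Char) (h : pvTrailBS cur % 2 = 1) :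
    pvCM cur (' ' :: r) = pvCM (cur ++ [' ']) r := by
  rw [pvCM.eq_def]; simp [h]
lemma pvCM_space_even (cur r : List Char) (h : ¬ pvTrailBS cur % 2 = 1) :
    pvCM cur (' ' :: r) = (cur :: (pvCM [] r).1, (pvCM [] r).2) := by
  rw [pvCM.eq_def]; simp [h]
lemma pvCM_cons_ne (cur : List Char) (c : Char) (r : List Char) (h : ¬ c = ' ') :
    pvCM cur (c :: r) = pvCM (cur ++ [c]) r := by
  rw [pvCM.eq_def]; simp [h]

lemma pvChunks_nil : pvChunks [] = ([], []) := by simp [pvChunks]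
lemma pvChunks_bs_nil : pvChunks ['\\'] = (['\\'], []) := by rw [pvChunks.eq_def]; simp
lemma pvChunks_bs_cons (c : Char) (r : List Char) :
    pvChunks ('\\' :: c :: r) = ('\\' :: c :: (pvChunks r).1, (pvChunks r).2) := by
  rw [pvChunks.eq_def]; simp
lemma pvChunks_space (r : List Char) :
    pvChunks (' ' :: r) = ([], (pvChunks r).1 :: (pvChunks r).2) := by
  rw [pvChunks.eq_def]; simp
lemma pvChunks_other (c : Char) (r : List Char) (hb : ¬ c = '\\') (hs : ¬ c = ' ') :
    pvChunks (c :: r) = (c :: (pvChunks r).1, (pvChunks r).2) := by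
  rw [pvChunks.eq_def]; simp [hb, hs]

lemma pvMergeGo_nil (acc : List (List Char)) (cur : List Char) :
    pvMergeGo acc cur [] = (acc, cur) := by simp [pvMergeGo]
lemma pvMergeGo_cons_odd (acc : List (List Char)) (cur t : List Char) (ts : List (List Char))
    (h : pvTrailBS cur % 2 = 1) :
    pvMergeGo acc cur (t :: ts) = pvMergeGo acc (cur ++ ' ' :: t) ts := by
  rw [pvMergeGo.eq_def]; simp [h]
lemma pvMergeGo_cons_even (acc : List (List Char)) (cur t : List Char) (ts : List (List Char))
    (h : ¬ pvTrailBS cur % 2 = 1) :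
    pvMergeGo acc cur (t :: ts) = pvMergeGo (acc ++ [cur]) t ts := by
  rw [pvMergeGo.eq_def]; simp [h]

-- ---- A = pvSpecLoop ----
lemma pvAStep_escaped (tags : PySem.Set String) (tag : List Char) (c : Char) :
    pvAStep (tags, tag, true) c = (tags, tag ++ [c], false) := by
  unfold pvAStep; split_ifs <;> simp_all

lemma pvMain : ∀ (n : Nat) (l : List Char) (tags : PySem.Set String) (tag : List Char),
    l.length ≤ n →
    (let st := l.foldl pvAStep (tags, tag, false)
     if st.2.1 ≠ [] then PySem.Set.add st.1 (String.ofList st.2.1) else st.1)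
      = pvSpecLoop tags tag l := by
  intro n
  induction n with
  | zero =>
    intro l tags tag h
    have hl : l = [] := List.length_eq_zero_iff.mp (Nat.le_zero.mp h)
    subst hl
    simp [pvSpecLoop]
  | succ n ih =>
    intro l tags tag h
    match l with
    | [] => simp [pvSpecLoop]
    | c :: rest =>
      by_cases hb : c = '\\'
      · subst hb
        match rest with
        | [] =>
          rw [pvSpecLoop.eq_def]
          simp [pvAStep]
        | c2 :: rest2 =>
          have hih := ih rest2 tags (tag ++ [c2]) (by simp at h ⊢; omega)
          rw [pvSpecLoop.eq_def]
          simpa [pvAStep, pvAStep_escaped] using hih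
      · by_cases hs : c = ' '
        · subst hs
          have hih := ih rest (PySem.Set.add tags (String.ofList tag)) [] (by simp at h ⊢; omega)
          rw [pvSpecLoop.eq_def]
          simpa [pvAStep] using hih
        · have hih := ih rest tags (tag ++ [c]) (by simp at h ⊢; omega)
          rw [pvSpecLoop.eq_def]
          simpa [pvAStep, hb, hs] using hih

-- ---- trailing-backslash count facts ----
lemma pvTrailBS_append_ne (cur : List Char) (c : Char) (hc : ¬ c = '\\') :
    pvTrailBS (cur ++ [c]) = 0 := by
  unfold pvTrailBS
  simp [hc]

lemma pvTrailBS_append_bs (cur : List Char) :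
    pvTrailBS (cur ++ ['\\']) = pvTrailBS cur + 1 := by
  unfold pvTrailBS
  have h1 : (List.dropWhile (fun x => decide (x = '\\')) cur.reverse).length ≤ cur.length := by
    have := List.length_dropWhile_le (p := fun x => decide (x = '\\')) cur.reverse
    simpa using this
  simp
  omega

lemma pvTrailBS_nil : pvTrailBS [] = 0 := by decide

-- ---- pvSpecLoop = pvFinRunT over pvChunks ----
lemma pvFinRunT_congr (tags : PySem.Set String) (tag1 tag2 h1 h2 : List Char)
    (t : List (List Char)) (hh : tag1 ++ pvSpecU h1 = tag2 ++ pvSpecU h2) :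
    pvFinRunT tags tag1 h1 t = pvFinRunT tags tag2 h2 t := by
  cases t <;> simp [pvFinRunT, hh]

lemma pvSpecLoop_eq_finRun : ∀ (n : Nat) (l : List Char) (tags : PySem.Set String) (tag : List Char),
    l.length ≤ n →
    pvSpecLoop tags tag l = pvFinRunT tags tag (pvChunks l).1 (pvChunks l).2 := by
  intro n
  induction n with
  | zero =>
    intro l tags tag h
    have hl : l = [] := List.length_eq_zero_iff.mp (Nat.le_zero.mp h)
    subst hl
    simp [pvSpecLoop, pvChunks, pvFinRunT, pvSpecU]
  | succ n ih =>
    intro l tags tag h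
    match l with
    | [] => simp [pvSpecLoop, pvChunks, pvFinRunT, pvSpecU]
    | c :: rest =>
      by_cases hb : c = '\\'
      · subst hb
        match rest with
        | [] =>
          rw [pvChunks_bs_nil]
          simp [pvSpecLoop, pvFinRunT, pvSpecU]
        | c2 :: rest2 =>
          have hih := ih rest2 tags (tag ++ [c2]) (by simp at h ⊢; omega)
          rw [pvSpecLoop.eq_def, pvChunks_bs_cons]
          simp only [reduceIte]
          rw [hih]
          exact pvFinRunT_congr _ _ _ _ _ _ (by rw [pvSpecU_bs_cons]; simp)
      · by_cases hs : c = ' '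
        · subst hs
          have hih := ih rest (PySem.Set.add tags (String.ofList tag)) [] (by simp at h ⊢; omega)
          rw [pvSpecLoop.eq_def, pvChunks_space]
          simp only [hb, if_neg, not_false_iff]
          rw [hih]
          simp [pvFinRunT, pvSpecU]
        · have hih := ih rest tags (tag ++ [c]) (by simp at h ⊢; omega)
          rw [pvSpecLoop.eq_def, pvChunks_other c rest hb hs]
          simp only [hb, hs, if_neg, not_false_iff]
          rw [hih]
          exact pvFinRunT_congr _ _ _ _ _ _ (by rw [pvSpecU_cons_ne c _ hb]; simp)

-- ---- PySem split on a single-character separator = pvSplit1 ----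
lemma pvSplitOn_go (ch : Char) : ∀ (n : Nat) (l : List Char) (cur : List Char) (acc : List (List Char)),
    l.length < n →
    PySem.Chars.splitOn.go [ch] n l cur acc
      = acc.reverse ++ (cur.reverse ++ (pvSplit1 ch l).1) :: (pvSplit1 ch l).2 := by
  intro n
  induction n with
  | zero => intro l cur acc h; omega
  | succ n ih =>
    intro l cur acc h
    match l with
    | [] =>
      rw [PySem.Chars.splitOn.go]
      · simp [pvSplit1]
      · omega
    | c :: rest =>
      by_cases hc : c = ch
      · subst hc
        have hstep : PySem.Chars.splitOn.go [c] (n+1) (c :: rest) cur acc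
            = PySem.Chars.splitOn.go [c] n rest [] (cur.reverse :: acc) := by
          rw [PySem.Chars.splitOn.go]
          simp [List.isPrefixOf]
        rw [hstep, ih rest [] (cur.reverse :: acc) (by simp at h ⊢; omega), pvSplit1_eqc]
        simp
      · have hstep : PySem.Chars.splitOn.go [ch] (n+1) (c :: rest) cur acc
            = PySem.Chars.splitOn.go [ch] n rest (c :: cur) acc := by
          rw [PySem.Chars.splitOn.go]
          simp [List.isPrefixOf, show ch ≠ c from fun hx => hc hx.symm]
        rw [hstep, ih rest (c :: cur) acc (by simp at h ⊢; omega), pvSplit1_ne ch c rest hc]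
        simp

lemma pvSplitOn_single (ch : Char) (s : List Char) :
    PySem.Chars.splitOn s [ch] = (pvSplit1 ch s).1 :: (pvSplit1 ch s).2 := by
  unfold PySem.Chars.splitOn
  simpa using pvSplitOn_go ch (s.length + 1) s [] [] (by omega)

-- ---- pvUnescape = pvSpecU ----
lemma pvUnescGo_cons_ne (p : List Char) (t : List (List Char)) (hp : p ≠ []) :
    pvUnescGo (p :: t) = p ++ pvUnescGo t := by
  cases t <;> simp [pvUnescGo, hp]

lemma pvUnescGo_nil_cons (q : List Char) (t : List (List Char)) :
    pvUnescGo ([] :: q :: t) = ('\\' :: q) ++ pvUnescGo t := by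
  simp [pvUnescGo]

lemma pvUnescCore : ∀ (n : Nat) (s : List Char), s.length ≤ n →
    (pvSplit1 '\\' s).1 ++ pvUnescGo (pvSplit1 '\\' s).2 = pvSpecU s := by
  intro n
  induction n with
  | zero =>
    intro s h
    have hl : s = [] := List.length_eq_zero_iff.mp (Nat.le_zero.mp h)
    subst hl
    simp [pvSplit1, pvUnescGo, pvSpecU]
  | succ n ih =>
    intro s h
    match s with
    | [] => simp [pvSplit1, pvUnescGo, pvSpecU]
    | c :: rest =>
      by_cases hb : c = '\\'
      · subst hb
        match rest with
        | [] =>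
          rw [pvSplit1_eqc, pvSplit1_nil]
          simp [pvUnescGo, pvSpecU]
        | c2 :: rest2 =>
          by_cases hb2 : c2 = '\\'
          · subst hb2
            have hih := ih rest2 (by simp at h ⊢; omega)
            rw [pvSplit1_eqc, pvSplit1_eqc, pvSpecU_bs_cons]
            simp only [List.nil_append]
            rw [pvUnescGo_nil_cons]
            simp only [List.cons_append]
            rw [hih]
          · have hih := ih rest2 (by simp at h ⊢; omega)
            rw [pvSplit1_eqc, pvSplit1_ne '\\' c2 rest2 hb2, pvSpecU_bs_cons]
            simp only [List.nil_append]
            rw [pvUnescGo_cons_ne _ _ (by simp)]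
            simp only [List.cons_append]
            rw [hih]
      · have hih := ih rest (by simp at h ⊢; omega)
        rw [pvSplit1_ne '\\' c rest hb, pvSpecU_cons_ne c _ hb]
        simp only [List.cons_append]
        rw [hih]

lemma pvUnescape_eq (s : List Char) : pvUnescape s = pvSpecU s := by
  unfold pvUnescape
  rw [pvSplitOn_single]
  exact pvUnescCore s.length s (le_refl _)

-- ---- merge loop: pvMergeGo over split tokens = pvCM ----
lemma pvMergeGo_eq_cm : ∀ (l : List Char) (acc : List (List Char)) (cur : List Char),
    pvMergeGo acc (cur ++ (pvSplit1 ' ' l).1) (pvSplit1 ' ' l).2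
      = (acc ++ (pvCM cur l).1, (pvCM cur l).2) := by
  intro l
  induction l with
  | nil => intro acc cur; simp [pvSplit1_nil, pvMergeGo_nil, pvCM_nil]
  | cons c r ih =>
    intro acc cur
    by_cases hs : c = ' '
    · subst hs
      rw [pvSplit1_eqc]
      simp only [List.append_nil]
      by_cases hpar : pvTrailBS cur % 2 = 1
      · rw [pvMergeGo_cons_odd _ _ _ _ hpar, pvCM_space_odd _ _ hpar]
        have := ih acc (cur ++ [' '])
        simpa using this
      · rw [pvMergeGo_cons_even _ _ _ _ hpar, pvCM_space_even _ _ hpar]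
        have := ih (acc ++ [cur]) []
        simpa using this
    · rw [pvSplit1_ne ' ' c r hs, pvCM_cons_ne cur c r hs]
      have := ih acc (cur ++ [c])
      simpa using this

-- ---- pvCM = pvChunks (with even trailing parity) ----
lemma pvCM_eq_chunks : ∀ (n : Nat) (l : List Char) (cur : List Char), l.length ≤ n →
    pvTrailBS cur % 2 = 0 →
    (pvCM cur l).1 ++ [(pvCM cur l).2]
      = (cur ++ (pvChunks l).1) :: (pvChunks l).2 := by
  intro n
  induction n with
  | zero =>
    intro l cur h heven
    have hl : l = [] := List.length_eq_zero_iff.mp (Nat.le_zero.mp h)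
    subst hl
    simp [pvCM_nil, pvChunks_nil]
  | succ n ih =>
    intro l cur h heven
    match l with
    | [] => simp [pvCM_nil, pvChunks_nil]
    | c :: rest =>
      by_cases hb : c = '\\'
      · subst hb
        match rest with
        | [] =>
          rw [pvCM_cons_ne cur '\\' [] (by decide), pvCM_nil, pvChunks_bs_nil]
          simp
        | c2 :: rest2 =>
          rw [pvCM_cons_ne cur '\\' (c2 :: rest2) (by decide), pvChunks_bs_cons]
          by_cases hs2 : c2 = ' '
          · subst hs2
            have hodd : pvTrailBS (cur ++ ['\\']) % 2 = 1 := by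
              rw [pvTrailBS_append_bs]; omega
            rw [pvCM_space_odd _ _ hodd]
            have hih := ih rest2 (cur ++ ['\\'] ++ [' ']) (by simp at h ⊢; omega)
              (by rw [pvTrailBS_append_ne _ _ (by decide)])
            rw [hih]
            simp
          · by_cases hb2 : c2 = '\\'
            · subst hb2
              rw [pvCM_cons_ne _ '\\' rest2 (by decide)]
              have hih := ih rest2 (cur ++ ['\\'] ++ ['\\']) (by simp at h ⊢; omega)
                (by rw [pvTrailBS_append_bs, pvTrailBS_append_bs]; omega)
              rw [hih]
              simp
            · rw [pvCM_cons_ne _ c2 rest2 hs2]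
              have hih := ih rest2 (cur ++ ['\\'] ++ [c2]) (by simp at h ⊢; omega)
                (by rw [pvTrailBS_append_ne _ _ hb2])
              rw [hih]
              simp
      · by_cases hs : c = ' '
        · subst hs
          have hnot : ¬ pvTrailBS cur % 2 = 1 := by omega
          rw [pvCM_space_even _ _ hnot, pvChunks_space]
          have hih := ih rest [] (by simp at h ⊢; omega) (by rw [pvTrailBS_nil])
          simp only [List.cons_append, List.nil_append] at hih ⊢
          rw [hih]
          simp
        · rw [pvCM_cons_ne cur c rest hs, pvChunks_other c rest hb hs]
          have hih := ih rest (cur ++ [c]) (by simp at h ⊢; omega)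
            (by rw [pvTrailBS_append_ne _ _ hb])
          rw [hih]
          simp

-- ---- B finalize = pvFinRunT ----
lemma pvFinalize_eq : ∀ (cs : List (List Char)) (fin : List Char) (tags : PySem.Set String)
    (h : List Char) (t : List (List Char)), cs ++ [fin] = h :: t →
    (if pvSpecU fin ≠ [] then
        PySem.Set.add (cs.foldl (fun s c => PySem.Set.add s (String.ofList (pvSpecU c))) tags)
          (String.ofList (pvSpecU fin))
      else cs.foldl (fun s c => PySem.Set.add s (String.ofList (pvSpecU c))) tags)
      = pvFinRunT tags [] h t := by
  intro cs
  induction cs with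
  | nil =>
    intro fin tags h t heq
    simp only [List.nil_append, List.cons.injEq] at heq
    obtain ⟨rfl, rfl⟩ := heq
    simp [pvFinRunT]
  | cons c cs' ih =>
    intro fin tags h t heq
    simp only [List.cons_append, List.cons.injEq] at heq
    obtain ⟨rfl, ht⟩ := heq
    match t, ht with
    | h2 :: t2, ht =>
      have hcs : cs' ++ [fin] = h2 :: t2 := ht
      rw [pvFinRunT]
      simp only [List.foldl_cons, List.nil_append]
      exact ih fin (PySem.Set.add tags (String.ofList (pvSpecU c))) h2 t2 hcs
    | [], ht => exact absurd ht (by cases cs' <;> simp)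

-- ===== VERDICT (by name: the statement is the Claim_ definition above) =====
theorem parse_space_separated_tags_spec : Claim_equal_parse_space_separated_tags := by
  intro inp _
  unfold Spec_parse_space_separated_tags parse_space_separated_tags parse_space_separated_tags_alt
  dsimp only
  have hA := pvMain inp.toList.length inp.toList PySem.Set.empty [] (le_refl _)
  simp only at hA
  rw [hA, pvSpecLoop_eq_finRun inp.toList.length inp.toList PySem.Set.empty [] (le_refl _)]
  -- B side
  rw [pvSplitOn_single]
  simp only [pvUnescape_eq]
  have hmg := pvMergeGo_eq_cm inp.toList [] []
  simp only [List.nil_append] at hmg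
  rw [hmg]
  have hch := pvCM_eq_chunks inp.toList.length inp.toList [] (le_refl _) (by rw [pvTrailBS_nil])
  simp only [List.nil_append] at hch
  rw [pvFinalize_eq (pvCM [] inp.toList).1 (pvCM [] inp.toList).2 PySem.Set.empty
    (pvChunks inp.toList).1 (pvChunks inp.toList).2 hch]
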